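-- pv_equiv track=rewrite | github.com/rtkfan/sfdc-ids | sfdc_ids.py | get_caps
-- ===== SOURCE A (Python) =====
-- def get_caps(input_string):
--     caps_nums = []
--     for starts in [0, 5, 10]:
--         caps_num = 0
--         chars = input_string[starts:starts+5]
--         for i in range(5):
--             caps_num += 2**i if chars[i].isupper() else 0
--         caps_nums.append(caps_num)
--
--     # convert each char to base 32, represented by [A-Z0-5] in that order
--     caps_chars = [str(i-26) if i > 25 else chr(i+ord('A')) for i in caps_nums]
--
--     return ''.join(caps_chars)
-- ===== SOURCE B (Python) =====
-- ALPHABET = 'ABCDEFGHIJKLMNOPQRSTUVWXYZ012345'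
--
--
-- def get_caps(input_string):
--     # One pass: fold positions 14..0 into a single 15-bit integer, then
--     # extract the three 5-bit fields with shift/mask into the alphabet table.
--     mask = 0
--     for i in reversed(range(15)):
--         mask = 2 * mask + input_string[i].isupper()
--     return ''.join(ALPHABET[(mask >> shift) & 31] for shift in (0, 5, 10))
-- ===== Notes on version B (the rewrite author's own statement) =====
-- stated objective: alternative
-- what changed: B folds the first 15 characters once (back to front) into a single 15-bit integer and extracts the three 5-bit output fields by shift-and-mask into a precomputed 32-char alphabet table, replacing A's three independent per-group power-of-two sums and the str(i-26)/chr(i+ord('A')) arithmetic.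
import Mathlib
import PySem

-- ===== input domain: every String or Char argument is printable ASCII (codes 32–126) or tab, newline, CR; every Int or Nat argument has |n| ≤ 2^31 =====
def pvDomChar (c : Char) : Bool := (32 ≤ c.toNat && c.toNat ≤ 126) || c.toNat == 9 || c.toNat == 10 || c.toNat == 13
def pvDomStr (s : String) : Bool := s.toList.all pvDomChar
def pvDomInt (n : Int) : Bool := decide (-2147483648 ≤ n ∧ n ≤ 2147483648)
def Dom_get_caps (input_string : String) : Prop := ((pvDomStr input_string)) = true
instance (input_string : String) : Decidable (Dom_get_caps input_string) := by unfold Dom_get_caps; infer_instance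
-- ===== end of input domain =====

-- B folds the first 15 characters once (back to front) into a single 15-bit integer and
-- extracts the three 5-bit fields by shift/mask into a precomputed 32-char table, instead of
-- A's three per-group power sums and str/chr arithmetic (alternative decomposition, same cost).


-- ===== PORT A =====
-- inner loop: caps_num = sum over i in range(5) of 2**i if chars[i].isupper() else 0
-- (chars[i] is total under Pre_; outside Pre_ Python raises IndexError, the port uses a default)
def capsNumA (chars : List Char) : Int :=
  (PySem.List.pyRange 0 5 1).foldl (fun caps_num i =>
    caps_num + (if PySem.Chars.isupper (PySem.List.pyGetD chars i ' ') then 2 ^ i.toNat else 0)) 0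

-- str(i-26) if i > 25 else chr(i+ord('A'))  (Char.ofNat is exact: i+65 is an ASCII code here)
def capA (i : Int) : List Char :=
  if i > 25 then (PySem.Int.toStr (i - 26)).toList else [Char.ofNat (i + 65).toNat]

def get_caps (input_string : String) : String :=
  let caps_nums : List Int :=
    ([0, 5, 10] : List Int).foldl (fun caps_nums starts =>
      let chars := PySem.List.slice input_string.toList (some starts) (some (starts + 5))
      caps_nums ++ [capsNumA chars]) []
  let caps_chars : List (List Char) := caps_nums.map capA
  String.ofList (PySem.Chars.join [] caps_chars)

-- ===== PORT B =====
def pvAlphabet : List Char := "ABCDEFGHIJKLMNOPQRSTUVWXYZ012345".toList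

-- input_string[i] is total under Pre_; outside Pre_ Python raises IndexError, the port uses a default
def get_caps_alt (input_string : String) : String :=
  let mask : Int := (PySem.List.pyRange 0 15 1).reverse.foldl
    (fun mask i => 2 * mask +
      (if PySem.Chars.isupper (PySem.List.pyGetD input_string.toList i ' ') then 1 else 0)) 0
  -- (mask >> shift) & 31 ported as floordiv by 2^shift then mod 32: exact since mask ≥ 0
  String.ofList (([0, 5, 10] : List Int).map
    (fun shift => PySem.List.pyGetD pvAlphabet
      (PySem.Int.mod (PySem.Int.floordiv mask (2 ^ shift.toNat)) 32) 'A'))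

-- ===== PRECONDITION & SPEC =====
-- Pre_ excludes exactly the inputs on which Python A raises IndexError (fewer than 15 chars).
def Pre_get_caps (input_string : String) : Prop := 15 ≤ input_string.toList.length
instance (input_string : String) : Decidable (Pre_get_caps input_string) := by unfold Pre_get_caps; infer_instance
def pvWitness_get_caps : String := "Hello World ABCdef"

def Spec_get_caps (input_string : String) (out : String) : Prop := out = get_caps_alt input_string
instance (input_string : String) (out : String) : Decidable (Spec_get_caps input_string out) := by unfold Spec_get_caps; infer_instance

-- ===== CLAIM (what is proved, stated in full; the proofs are below) =====
def Claim_equal_get_caps : Prop := ∀ (input_string : String), Dom_get_caps input_string → Pre_get_caps input_string → Spec_get_caps input_string (get_caps input_string)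

-- ===== LEMMAS AND PROOFS =====

lemma v_bounds (b : Bool) : 0 ≤ (if b = true then (1:Int) else 0) ∧ (if b = true then (1:Int) else 0) ≤ 1 := by
  cases b <;> simp

-- the base-32 character: A's str/chr arithmetic equals indexing the alphabet table
lemma capA_eq (n : Int) (h0 : 0 ≤ n) (h1 : n < 32) :
    capA n = [PySem.List.pyGetD pvAlphabet n 'A'] := by
  interval_cases n <;> decide

-- one output component: A's group value vs B's extracted field
lemma comp (X Y : Int) (h : Y = X) (h0 : 0 ≤ X) (h1 : X < 32) :
    capA X = [PySem.List.pyGetD pvAlphabet Y 'A'] := by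
  rw [h]; exact capA_eq X h0 h1

-- ===== VERDICT (by name: the statement is the Claim_ definition above) =====
set_option maxHeartbeats 1000000 in
theorem get_caps_spec : Claim_equal_get_caps := by
  intro s _ hpre
  unfold Pre_get_caps at hpre
  unfold Spec_get_caps get_caps get_caps_alt
  generalize hL : s.toList = l
  rw [hL] at hpre
  clear hL
  obtain ⟨c0, c1, c2, c3, c4, c5, c6, c7, c8, c9, c10, c11, c12, c13, c14, rest, rfl⟩ :
      ∃ c0 c1 c2 c3 c4 c5 c6 c7 c8 c9 c10 c11 c12 c13 c14 rest,
        l = c0::c1::c2::c3::c4::c5::c6::c7::c8::c9::c10::c11::c12::c13::c14::rest := by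
    rcases l with _|⟨c0,l⟩; · exfalso; simp at hpre
    rcases l with _|⟨c1,l⟩; · exfalso; simp at hpre
    rcases l with _|⟨c2,l⟩; · exfalso; simp at hpre
    rcases l with _|⟨c3,l⟩; · exfalso; simp at hpre
    rcases l with _|⟨c4,l⟩; · exfalso; simp at hpre
    rcases l with _|⟨c5,l⟩; · exfalso; simp at hpre
    rcases l with _|⟨c6,l⟩; · exfalso; simp at hpre
    rcases l with _|⟨c7,l⟩; · exfalso; simp at hpre
    rcases l with _|⟨c8,l⟩; · exfalso; simp at hpre
    rcases l with _|⟨c9,l⟩; · exfalso; simp at hpre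
    rcases l with _|⟨c10,l⟩; · exfalso; simp at hpre
    rcases l with _|⟨c11,l⟩; · exfalso; simp at hpre
    rcases l with _|⟨c12,l⟩; · exfalso; simp at hpre
    rcases l with _|⟨c13,l⟩; · exfalso; simp at hpre
    rcases l with _|⟨c14,l⟩; · exfalso; simp at hpre
    exact ⟨c0, c1, c2, c3, c4, c5, c6, c7, c8, c9, c10, c11, c12, c13, c14, l, rfl⟩
  clear hpre
  have s0 : PySem.List.slice (c0::c1::c2::c3::c4::c5::c6::c7::c8::c9::c10::c11::c12::c13::c14::rest) (some 0) (some (0 + 5)) = [c0, c1, c2, c3, c4] := by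
    simp [pysem]
  have s1 : PySem.List.slice (c0::c1::c2::c3::c4::c5::c6::c7::c8::c9::c10::c11::c12::c13::c14::rest) (some 5) (some (5 + 5)) = [c5, c6, c7, c8, c9] := by
    simp [pysem]
  have s2 : PySem.List.slice (c0::c1::c2::c3::c4::c5::c6::c7::c8::c9::c10::c11::c12::c13::c14::rest) (some 10) (some (10 + 5)) = [c10, c11, c12, c13, c14] := by
    simp [pysem]
  have hr : PySem.List.pyRange 0 5 1 = [0, 1, 2, 3, 4] := by decide
  have hr15 : (PySem.List.pyRange 0 15 1).reverse = [14, 13, 12, 11, 10, 9, 8, 7, 6, 5, 4, 3, 2, 1, 0] := by decide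
  simp only [List.foldl, s0, s1, s2, hr15, List.map,
    List.nil_append, List.cons_append, capsNumA, hr]
  simp only [pysem]
  simp only [List.getD]
  norm_num
  simp only [show Int.toNat 2 = 2 from rfl, show Int.toNat 3 = 3 from rfl,
    show Int.toNat 4 = 4 from rfl, show Int.toNat 5 = 5 from rfl,
    show Int.toNat 10 = 10 from rfl]
  norm_num
  have e2 : ∀ b : Bool, (if b = true then (2:Int) else 0) = 2 * (if b = true then 1 else 0) := by
    intro b; cases b <;> norm_num
  have e4 : ∀ b : Bool, (if b = true then (4:Int) else 0) = 4 * (if b = true then 1 else 0) := by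
    intro b; cases b <;> norm_num
  have e8 : ∀ b : Bool, (if b = true then (8:Int) else 0) = 8 * (if b = true then 1 else 0) := by
    intro b; cases b <;> norm_num
  have e16 : ∀ b : Bool, (if b = true then (16:Int) else 0) = 16 * (if b = true then 1 else 0) := by
    intro b; cases b <;> norm_num
  simp only [e2, e4, e8, e16]
  have b0 := v_bounds (PySem.Chars.isupper c0)
  generalize hv0 : (if PySem.Chars.isupper c0 = true then (1:Int) else 0) = v0 at b0 ⊢
  have b1 := v_bounds (PySem.Chars.isupper c1)
  generalize hv1 : (if PySem.Chars.isupper c1 = true then (1:Int) else 0) = v1 at b1 ⊢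
  have b2 := v_bounds (PySem.Chars.isupper c2)
  generalize hv2 : (if PySem.Chars.isupper c2 = true then (1:Int) else 0) = v2 at b2 ⊢
  have b3 := v_bounds (PySem.Chars.isupper c3)
  generalize hv3 : (if PySem.Chars.isupper c3 = true then (1:Int) else 0) = v3 at b3 ⊢
  have b4 := v_bounds (PySem.Chars.isupper c4)
  generalize hv4 : (if PySem.Chars.isupper c4 = true then (1:Int) else 0) = v4 at b4 ⊢
  have b5 := v_bounds (PySem.Chars.isupper c5)
  generalize hv5 : (if PySem.Chars.isupper c5 = true then (1:Int) else 0) = v5 at b5 ⊢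
  have b6 := v_bounds (PySem.Chars.isupper c6)
  generalize hv6 : (if PySem.Chars.isupper c6 = true then (1:Int) else 0) = v6 at b6 ⊢
  have b7 := v_bounds (PySem.Chars.isupper c7)
  generalize hv7 : (if PySem.Chars.isupper c7 = true then (1:Int) else 0) = v7 at b7 ⊢
  have b8 := v_bounds (PySem.Chars.isupper c8)
  generalize hv8 : (if PySem.Chars.isupper c8 = true then (1:Int) else 0) = v8 at b8 ⊢
  have b9 := v_bounds (PySem.Chars.isupper c9)
  generalize hv9 : (if PySem.Chars.isupper c9 = true then (1:Int) else 0) = v9 at b9 ⊢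
  have b10 := v_bounds (PySem.Chars.isupper c10)
  generalize hv10 : (if PySem.Chars.isupper c10 = true then (1:Int) else 0) = v10 at b10 ⊢
  have b11 := v_bounds (PySem.Chars.isupper c11)
  generalize hv11 : (if PySem.Chars.isupper c11 = true then (1:Int) else 0) = v11 at b11 ⊢
  have b12 := v_bounds (PySem.Chars.isupper c12)
  generalize hv12 : (if PySem.Chars.isupper c12 = true then (1:Int) else 0) = v12 at b12 ⊢
  have b13 := v_bounds (PySem.Chars.isupper c13)
  generalize hv13 : (if PySem.Chars.isupper c13 = true then (1:Int) else 0) = v13 at b13 ⊢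
  have b14 := v_bounds (PySem.Chars.isupper c14)
  generalize hv14 : (if PySem.Chars.isupper c14 = true then (1:Int) else 0) = v14 at b14 ⊢
  have cat : ∀ a b : List Char, String.ofList a ++ String.ofList b = String.ofList (a ++ b) :=
    fun _ _ => String.ofList_append.symm
  have h0 : capA (v0 + 2 * v1 + 4 * v2 + 8 * v3 + 16 * v4) =
      [PySem.List.pyGetD pvAlphabet ((2 * (2 * (2 * (2 * (2 * (2 * (2 * (2 * (2 * (2 * (2 * (2 * (2 * (2 * v14 + v13) + v12) + v11) + v10) + v9) + v8) + v7) + v6) + v5) + v4) + v3) + v2) + v1) + v0) % 32) 'A'] :=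
    comp _ _ (by omega) (by omega) (by omega)
  have h1 : capA (v5 + 2 * v6 + 4 * v7 + 8 * v8 + 16 * v9) =
      [PySem.List.pyGetD pvAlphabet ((2 * (2 * (2 * (2 * (2 * (2 * (2 * (2 * (2 * (2 * (2 * (2 * (2 * (2 * v14 + v13) + v12) + v11) + v10) + v9) + v8) + v7) + v6) + v5) + v4) + v3) + v2) + v1) + v0) / 32 % 32) 'A'] :=
    comp _ _ (by omega) (by omega) (by omega)
  have h2 : capA (v10 + 2 * v11 + 4 * v12 + 8 * v13 + 16 * v14) =
      [PySem.List.pyGetD pvAlphabet ((2 * (2 * (2 * (2 * (2 * (2 * (2 * (2 * (2 * (2 * (2 * (2 * (2 * (2 * v14 + v13) + v12) + v11) + v10) + v9) + v8) + v7) + v6) + v5) + v4) + v3) + v2) + v1) + v0) / 1024 % 32) 'A'] :=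
    comp _ _ (by omega) (by omega) (by omega)
  rw [h0, h1, h2, cat, cat]
  rfl
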